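-- pv_equiv track=rewrite | github.com/EPFLiGHT/brightdaybot | handlers/command_handler.py | parse_test_command_args
-- ===== SOURCE A (Python) =====
-- def parse_test_command_args(args):
--     """
--     Parse test command arguments to extract quality, image_size, and text_only flag
--
--     Args:
--         args: List of command arguments
--
--     Returns:
--         tuple: (quality, image_size, text_only, error_message)
--         If error_message is not None, parsing failed
--     """
--     quality = None
--     image_size = None
--     text_only = False
--
--     # Filter out --text-only flag first
--     filtered_args = []
--     for arg in args:
--         if arg.lower() == "--text-only":
--             text_only = True
--         else:
--             filtered_args.append(arg)
--
--     # Process remaining arguments for quality and size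
--     if len(filtered_args) > 0:
--         quality_arg = filtered_args[0].lower()
--         if quality_arg in ["low", "medium", "high", "auto"]:
--             quality = quality_arg
--         else:
--             return (
--                 None,
--                 None,
--                 False,
--                 f"Invalid quality '{filtered_args[0]}'. Valid options: low, medium, high, auto",
--             )
--
--     if len(filtered_args) > 1:
--         size_arg = filtered_args[1].lower()
--         if size_arg in ["auto", "1024x1024", "1536x1024", "1024x1536"]:
--             image_size = size_arg
--         else:
--             return (
--                 None,
--                 None,
--                 False,
--                 f"Invalid size '{filtered_args[1]}'. Valid options: auto, 1024x1024, 1536x1024, 1024x1536",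
--             )
--
--     if len(filtered_args) > 2:
--         return (
--             None,
--             None,
--             False,
--             f"Too many arguments. Expected: [quality] [size] [--text-only]",
--         )
--
--     return quality, image_size, text_only, None
-- ===== SOURCE B (Python) =====
-- def parse_test_command_args(args):
--     """Single pass over args: flags set text_only, positionals are validated in place."""
--     quality = None
--     image_size = None
--     text_only = False
--     pos = 0
--     for arg in args:
--         low = arg.lower()
--         if low == "--text-only":
--             text_only = True
--             continue
--         if pos == 0:
--             if low in ("low", "medium", "high", "auto"):
--                 quality = low
--             else:
--                 return (
--                     None,
--                     None,
--                     False,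
--                     f"Invalid quality '{arg}'. Valid options: low, medium, high, auto",
--                 )
--         elif pos == 1:
--             if low in ("auto", "1024x1024", "1536x1024", "1024x1536"):
--                 image_size = low
--             else:
--                 return (
--                     None,
--                     None,
--                     False,
--                     f"Invalid size '{arg}'. Valid options: auto, 1024x1024, 1536x1024, 1024x1536",
--                 )
--         else:
--             return (
--                 None,
--                 None,
--                 False,
--                 f"Too many arguments. Expected: [quality] [size] [--text-only]",
--             )
--         pos += 1
--     return quality, image_size, text_only, None
-- ===== Notes on version B (the rewrite author's own statement) =====
-- stated objective: simpler
-- what changed: Replaced A's two-phase filter-then-index structure (build a filtered list, then index it with a chain of length checks) by one single pass that handles flags and validates each positional immediately via a position counter, never materialising the filtered list.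
import Mathlib
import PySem

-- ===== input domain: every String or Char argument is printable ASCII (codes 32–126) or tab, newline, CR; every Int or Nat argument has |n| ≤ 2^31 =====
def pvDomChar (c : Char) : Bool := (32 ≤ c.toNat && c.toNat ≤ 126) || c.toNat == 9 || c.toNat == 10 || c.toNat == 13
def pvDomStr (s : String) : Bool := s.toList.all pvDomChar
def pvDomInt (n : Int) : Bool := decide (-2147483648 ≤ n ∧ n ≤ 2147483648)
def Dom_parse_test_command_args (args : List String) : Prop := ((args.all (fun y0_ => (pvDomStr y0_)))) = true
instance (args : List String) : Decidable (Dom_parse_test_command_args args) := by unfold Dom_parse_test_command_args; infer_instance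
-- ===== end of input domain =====

-- B replaces A's filter-then-index two-phase parse by a single pass with a positional counter; objective: simpler.

-- ===== PORT A =====
-- A's first loop: filter out --text-only flags, accumulating filtered args (in order) and the text_only flag.
def pvAFilter (args : List String) (filtered : List String) (text_only : Bool) :
    List String × Bool :=
  match args with
  | [] => (filtered, text_only)
  | a :: rest =>
    if PySem.Str.lower a == "--text-only" then pvAFilter rest filtered true
    else pvAFilter rest (filtered ++ [a]) text_only

-- A's second phase: the chain of length checks / validations on the filtered list.
def pvAFinish (p : List String × Bool) : Option String × Option String × Bool × Option String :=
  match p.1 with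
  | [] => (none, none, p.2, none)
  | f0 :: rest0 =>
    let quality_arg := PySem.Str.lower f0
    if quality_arg ∈ (["low", "medium", "high", "auto"] : List String) then
      match rest0 with
      | [] => (some quality_arg, none, p.2, none)
      | f1 :: rest1 =>
        let size_arg := PySem.Str.lower f1
        if size_arg ∈ (["auto", "1024x1024", "1536x1024", "1024x1536"] : List String) then
          if rest1.length > 0 then
            (none, none, false, some "Too many arguments. Expected: [quality] [size] [--text-only]")
          else (some quality_arg, some size_arg, p.2, none)
        else (none, none, false,
          some ("Invalid size '" ++ f1 ++ "'. Valid options: auto, 1024x1024, 1536x1024, 1024x1536"))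
    else (none, none, false,
      some ("Invalid quality '" ++ f0 ++ "'. Valid options: low, medium, high, auto"))

def parse_test_command_args (args : List String) : Option String × Option String × Bool × Option String :=
  pvAFinish (pvAFilter args [] false)

-- ===== PORT B =====
-- B: one pass; pos counts the positional (non-flag) arguments already consumed.
def pvBGo (args : List String) (pos : Nat) (quality image_size : Option String) (text_only : Bool) :
    Option String × Option String × Bool × Option String :=
  match args with
  | [] => (quality, image_size, text_only, none)
  | a :: rest =>
    let low := PySem.Str.lower a
    if low == "--text-only" then pvBGo rest pos quality image_size true
    else if pos == 0 then
      if low ∈ (["low", "medium", "high", "auto"] : List String) then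
        pvBGo rest (pos + 1) (some low) image_size text_only
      else (none, none, false,
        some ("Invalid quality '" ++ a ++ "'. Valid options: low, medium, high, auto"))
    else if pos == 1 then
      if low ∈ (["auto", "1024x1024", "1536x1024", "1024x1536"] : List String) then
        pvBGo rest (pos + 1) quality (some low) text_only
      else (none, none, false,
        some ("Invalid size '" ++ a ++ "'. Valid options: auto, 1024x1024, 1536x1024, 1024x1536"))
    else (none, none, false, some "Too many arguments. Expected: [quality] [size] [--text-only]")

def parse_test_command_args_alt (args : List String) : Option String × Option String × Bool × Option String :=
  pvBGo args 0 none none false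

-- ===== PRECONDITION & SPEC =====
def Spec_parse_test_command_args (args : List String) (out : Option String × Option String × Bool × Option String) : Prop := out = parse_test_command_args_alt args
instance (args : List String) (out : Option String × Option String × Bool × Option String) : Decidable (Spec_parse_test_command_args args out) := by unfold Spec_parse_test_command_args; infer_instance

-- ===== CLAIM (what is proved, stated in full; the proofs are below) =====
def Claim_equal_parse_test_command_args : Prop := ∀ (args : List String), Dom_parse_test_command_args args → Spec_parse_test_command_args args (parse_test_command_args args)

-- ===== LEMMAS AND PROOFS =====

-- A's filter loop decomposes: accumulator is a prefix, flag is OR'ed in.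
theorem pvAFilter_decomp (args : List String) (f : List String) (t : Bool) :
    pvAFilter args f t =
      (f ++ (pvAFilter args [] false).1, t || (pvAFilter args [] false).2) := by
  induction args generalizing f t with
  | nil => simp [pvAFilter]
  | cons a rest ih =>
    simp only [pvAFilter, List.nil_append]
    split
    · rw [ih f true, ih [] true]
      simp
    · rw [ih (f ++ [a]) t, ih [a] false]
      simp

-- invariant on B's state as a function of A's accumulated filtered list
def pvGood (f : List String) : Prop :=
  match f with
  | [] => True
  | [a] => PySem.Str.lower a ∈ (["low", "medium", "high", "auto"] : List String)
  | [a, b] => PySem.Str.lower a ∈ (["low", "medium", "high", "auto"] : List String) ∧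
      PySem.Str.lower b ∈ (["auto", "1024x1024", "1536x1024", "1024x1536"] : List String)
  | _ => False

def pvQOf (f : List String) : Option String := (f.head?).map PySem.Str.lower
def pvSOf (f : List String) : Option String := (f[1]?).map PySem.Str.lower

theorem pvMain (args : List String) (f : List String) (t : Bool) (hf : pvGood f) :
    pvAFinish (pvAFilter args f t) = pvBGo args f.length (pvQOf f) (pvSOf f) t := by
  induction args generalizing f t with
  | nil =>
    match f, hf with
    | [], _ => simp [pvAFilter, pvAFinish, pvBGo, pvQOf, pvSOf]
    | [a], h =>
      simp only [pvGood, List.mem_cons, List.not_mem_nil, or_false] at h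
      rcases h with h | h | h | h <;> simp [pvAFilter, pvAFinish, pvBGo, pvQOf, pvSOf, h]
    | [a, b], h =>
      obtain ⟨h1, h2⟩ := h
      simp only [List.mem_cons, List.not_mem_nil, or_false] at h1 h2
      rcases h1 with h1 | h1 | h1 | h1 <;> rcases h2 with h2 | h2 | h2 | h2 <;>
        simp [pvAFilter, pvAFinish, pvBGo, pvQOf, pvSOf, h1, h2]
  | cons a rest ih =>
    simp only [pvAFilter, pvBGo]
    by_cases hfl : PySem.Str.lower a == "--text-only"
    · simp only [hfl, if_pos]
      exact ih f true hf
    · simp only [hfl, if_neg, Bool.false_eq_true, not_false_iff]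
      match f, hf with
      | [], _ =>
        by_cases hq : PySem.Str.lower a ∈ (["low", "medium", "high", "auto"] : List String)
        · have := ih [a] t (by simpa [pvGood] using hq)
          simpa [pvQOf, pvSOf, hq] using this
        · rw [pvAFilter_decomp]
          simp [pvAFinish, hq]
      | [a0], h0 =>
        by_cases hs : PySem.Str.lower a ∈ (["auto", "1024x1024", "1536x1024", "1024x1536"] : List String)
        · have := ih [a0, a] t (by exact ⟨h0, hs⟩)
          simpa [pvQOf, pvSOf, hs] using this
        · rw [pvAFilter_decomp]
          have h0' := h0
          simp only [pvGood, List.mem_cons, List.not_mem_nil, or_false] at h0'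
          rcases h0' with h0' | h0' | h0' | h0' <;> simp [pvAFinish, h0', hs]
      | [a0, a1], h01 =>
        rw [pvAFilter_decomp]
        obtain ⟨h1, h2⟩ := h01
        simp only [List.mem_cons, List.not_mem_nil, or_false] at h1 h2
        rcases h1 with h1 | h1 | h1 | h1 <;> rcases h2 with h2 | h2 | h2 | h2 <;>
          simp [pvAFinish, h1, h2]

-- ===== VERDICT (by name: the statement is the Claim_ definition above) =====
theorem parse_test_command_args_spec : Claim_equal_parse_test_command_args := by
  intro args _
  show parse_test_command_args args = parse_test_command_args_alt args
  have h := pvMain args [] false trivial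
  simpa [parse_test_command_args, parse_test_command_args_alt, pvQOf, pvSOf] using h
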